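-- pv_equiv track=rewrite | github.com/AljaZaletelj/programiranje-1 | 13-memoizacija/vaje/dinamicno_in_memo.py | zabica
-- ===== SOURCE A (Python) =====
-- from functools import lru_cache
--
-- def zabica(mocvara):
--     @lru_cache
--     def pobeg(k, e):
--         if k >= len(mocvara):
--             return 0
--         else:
--             e += mocvara[k]
--             return 1 + min([pobeg(k + d, e - d) for d in range(1, e + 1)])
--     return pobeg(0, 0)
-- ===== SOURCE B (Python) =====
-- def zabica(mocvara):
--     # Bottom-up DP over collapsed states (k, s): position k with "reach budget" s = k + pre-jump energy.
--     # A's state (k, e) collapses to s = k + e since every child of (k, e) has the same k' + e' = k + e + mocvara[k].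
--     n = len(mocvara)
--     if n == 0:
--         return 0
--     g = {}
--     for k in range(n - 1, -1, -1):
--         for s in range(k, n):
--             r = s + mocvara[k]
--             if r >= n:
--                 g[(k, s)] = 1
--             else:
--                 g[(k, s)] = 1 + min([g[(k2, r)] for k2 in range(k + 1, r + 1)])
--     return g[(0, 0)]
-- ===== Notes on version B (the rewrite author's own statement) =====
-- stated objective: alternative
-- what changed: Replaces A's memoized top-down recursion over (position, energy) states by an explicit bottom-up table over the collapsed states (k, s = k + energy), exploiting that every successor of a state (k, e) shares the same k' + e', so only the O(n^2) pairs with k <= s < n are ever tabulated (O(n^3) total, independent of the entry values, vs A's value-dependent state space).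
-- outside the precondition, e.g. on zabica([3, 0, 0]): A returns 1, B raises ValueError
import Mathlib
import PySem

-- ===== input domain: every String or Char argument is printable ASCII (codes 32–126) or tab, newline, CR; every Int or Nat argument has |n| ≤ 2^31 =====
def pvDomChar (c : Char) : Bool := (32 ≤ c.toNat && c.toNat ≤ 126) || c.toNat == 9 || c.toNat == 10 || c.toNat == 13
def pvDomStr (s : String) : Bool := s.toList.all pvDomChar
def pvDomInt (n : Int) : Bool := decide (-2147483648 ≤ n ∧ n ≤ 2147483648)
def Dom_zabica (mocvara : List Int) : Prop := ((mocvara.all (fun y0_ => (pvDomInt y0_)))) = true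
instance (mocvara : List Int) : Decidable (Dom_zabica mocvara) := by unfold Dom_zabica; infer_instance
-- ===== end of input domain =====

-- B replaces A's memoized recursion over states (k, energy) by a bottom-up table over the
-- collapsed states (k, s = k + energy), tabulating only the pairs with k <= s < n (alternative).

-- ===== PORT A =====
-- inner helper pobeg(k, e); k is only ever called with k ≥ 0, so it is a Nat here.
-- 'none' is exactly where Python raises ValueError (empty min), propagated
-- through the recursive calls as the comprehension propagates an inner raise.
def zabicaPobeg (m : List Int) (k : Nat) (e : Int) : Option Int :=
  if h : m.length ≤ k then some 0
  else
    let e2 := e + PySem.List.pyGetD m (k : Int) 0   -- e += mocvara[k]; 0 ≤ k < len here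
    match (PySem.List.pyRange 1 (e2 + 1) 1).attach.mapM
        (fun d => zabicaPobeg m (k + d.1.toNat) (e2 - d.1)) with
    | none => none
    | some vals =>
      match PySem.List.min? vals (fun y => y) with
      | none => none                                -- min of an empty list raises ValueError
      | some v => some (1 + v)
termination_by m.length - k
decreasing_by
  have hd := (PySem.List.mem_pyRange_one.mp d.2).1
  omega

def zabica (mocvara : List Int) : Int :=
  (zabicaPobeg mocvara 0 0).getD 0

-- ===== PORT B =====
def zabica_alt (mocvara : List Int) : Int :=
  let n : Int := mocvara.length
  if n = 0 then 0
  else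
    let g : PySem.Dict (Int × Int) Int :=
      (PySem.List.pyRange (n - 1) (-1) (-1)).foldl (fun g k =>
        (PySem.List.pyRange k n 1).foldl (fun g s =>
          let r := s + PySem.List.pyGetD mocvara k 0
          if n ≤ r then g.insert (k, s) 1
          else
            match PySem.List.min?
                ((PySem.List.pyRange (k + 1) (r + 1) 1).map (fun k2 => g.getD (k2, r) 0))
                (fun y => y) with
            | none => g                              -- min of an empty list raises ValueError; unreachable under Pre_
            | some v => g.insert (k, s) (1 + v)
          ) g) PySem.Dict.empty
    g.getD (0, 0) 0                                  -- g[(0,0)]; the key is present under Pre_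

-- ===== PRECONDITION & SPEC =====
-- Pre_ keeps the natural swamp domain, all step values ≥ 1: outside it A raises ValueError
-- on most inputs and B raises on a superset of those (B's unreachable table cells can hit
-- an empty min even where A's lazily explored states avoid it), so the returning sets differ.
def Pre_zabica (mocvara : List Int) : Prop := ∀ x ∈ mocvara, 1 ≤ x
instance (mocvara : List Int) : Decidable (Pre_zabica mocvara) := by unfold Pre_zabica; infer_instance

def pvWitness_zabica : List Int := [2, 1, 3, 1]

def Spec_zabica (mocvara : List Int) (out : Int) : Prop := out = zabica_alt mocvara
instance (mocvara : List Int) (out : Int) : Decidable (Spec_zabica mocvara out) := by unfold Spec_zabica; infer_instance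

-- ===== CLAIM (what is proved, stated in full; the proofs are below) =====
def Claim_equal_zabica : Prop := ∀ (mocvara : List Int), Dom_zabica mocvara → Pre_zabica mocvara → Spec_zabica mocvara (zabica mocvara)

-- ===== LEMMAS AND PROOFS =====

-- The common mathematical value: G k s = minimal number of jumps to escape from position k
-- when k + (pre-jump energy) = s; both ports compute G 0 0.
def zabicaG (m : List Int) (k s : Nat) : Int :=
  if h : m.length ≤ k then 0
  else
    let r : Int := (s : Int) + m.getD k 0
    if (m.length : Int) ≤ r then 1
    else 1 + (PySem.List.min?
        ((PySem.List.pyRange ((k : Int) + 1) (r + 1) 1).attach.map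
          (fun k2 => zabicaG m k2.1.toNat r.toNat))
        (fun y => y)).getD 0
termination_by m.length - k
decreasing_by
  have hd := (PySem.List.mem_pyRange_one.mp k2.2).1
  omega



-- generic: a mapM over Option whose calls all succeed
lemma zabicaMapM_eq_some_map {α β : Type} {l : List α} {f : α → Option β} {g : α → β}
    (h : ∀ x ∈ l, f x = some (g x)) : l.mapM f = some (l.map g) := by
  induction l with
  | nil => rfl
  | cons a t ih =>
    rw [List.mapM_cons, h a (by simp), ih (fun x hx => h x (by simp [hx]))]
    rfl

-- zabicaG with the termination 'attach' removed
lemma zabicaG_eq (m : List Int) (k s : Nat) (hk : k < m.length) :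
    zabicaG m k s =
      if (m.length : Int) ≤ (s : Int) + m.getD k 0 then 1
      else 1 + (PySem.List.min?
          ((PySem.List.pyRange ((k : Int) + 1) (((s : Int) + m.getD k 0) + 1) 1).map
            (fun k2 => zabicaG m k2.toNat ((s : Int) + m.getD k 0).toNat))
          (fun y => y)).getD 0 := by
  rw [zabicaG]
  simp only [dif_neg (by omega : ¬ m.length ≤ k)]
  rw [List.attach_map_val (l := PySem.List.pyRange ((k : Int) + 1) (((s : Int) + m.getD k 0) + 1) 1)
    (f := fun k2 => zabicaG m k2.toNat ((s : Int) + m.getD k 0).toNat)]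

lemma zabicaG_nonneg_aux (m : List Int) :
    ∀ (t k s : Nat), m.length - k ≤ t → 0 ≤ zabicaG m k s := by
  intro t
  induction t with
  | zero =>
    intro k s ht
    rw [zabicaG]; simp [show m.length ≤ k by omega]
  | succ t ih =>
    intro k s ht
    by_cases hk : m.length ≤ k
    · rw [zabicaG]; simp [hk]
    · rw [zabicaG_eq m k s (by omega)]
      split
      · norm_num
      · cases hmin : PySem.List.min?
            ((PySem.List.pyRange ((k : Int) + 1) (((s : Int) + m.getD k 0) + 1) 1).map
              (fun k2 => zabicaG m k2.toNat ((s : Int) + m.getD k 0).toNat))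
            (fun y => y) with
        | none => simp
        | some v =>
          have hv := PySem.List.min?_mem hmin
          simp only [List.mem_map] at hv
          obtain ⟨k2, hk2mem, hk2⟩ := hv
          have hge := (PySem.List.mem_pyRange_one.mp hk2mem).1
          have : 0 ≤ v := by
            rw [← hk2]
            exact ih k2.toNat _ (by omega)
          simp; omega

lemma zabicaG_nonneg (m : List Int) (k s : Nat) : 0 ≤ zabicaG m k s :=
  zabicaG_nonneg_aux m (m.length - k) k s le_rfl

-- Python's min(l) for a list of nonnegatives containing 0
lemma zabicaMin?_eq_zero {l : List Int} (h0 : (0 : Int) ∈ l) (hn : ∀ x ∈ l, 0 ≤ x) :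
    PySem.List.min? l (fun y => y) = some 0 := by
  cases hmin : PySem.List.min? l (fun y => y) with
  | none =>
    rw [PySem.List.min?_eq_none_iff] at hmin
    subst hmin; simp at h0
  | some v =>
    have h1 := PySem.List.min?_isMin hmin 0 h0
    have h2 := hn v (PySem.List.min?_mem hmin)
    rw [le_antisymm h1 h2]

lemma zabicaPobeg_eq_G_aux (m : List Int) (hm : ∀ x ∈ m, 1 ≤ x) :
    ∀ (t : Nat) (k : Nat) (e : Int), m.length - k ≤ t → 0 ≤ e →
      zabicaPobeg m k e = some (zabicaG m k (k + e.toNat)) := by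
  intro t
  induction t with
  | zero =>
    intro k e ht he
    have hk : m.length ≤ k := by omega
    rw [zabicaPobeg, zabicaG]; simp [hk]
  | succ t ih =>
    intro k e ht he
    by_cases hk : m.length ≤ k
    · rw [zabicaPobeg, zabicaG]; simp [hk]
    · have hklt : k < m.length := by omega
      have hM1 : 1 ≤ m.getD k 0 := by
        rw [List.getD_eq_getElem m 0 hklt]
        exact hm _ (List.getElem_mem hklt)
      rw [zabicaPobeg]
      simp only [dif_neg hk]
      set e2 : Int := e + PySem.List.pyGetD m ((k : Nat) : Int) 0 with he2
      have he2v : e2 = e + m.getD k 0 := by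
        rw [he2, PySem.List.pyGetD_natCast]
      have he21 : 1 ≤ e2 := by omega
      -- all recursive calls succeed and compute G at (k + d, (k + e2).toNat)
      have hcalls : ∀ d ∈ (PySem.List.pyRange 1 (e2 + 1) 1).attach,
          zabicaPobeg m (k + (d.1).toNat) (e2 - d.1) =
            some (zabicaG m (k + (d.1).toNat) ((k : Int) + e2).toNat) := by
        intro d _
        obtain ⟨hd1, hd2⟩ := PySem.List.mem_pyRange_one.mp d.2
        have hgoal := ih (k + (d.1).toNat) (e2 - d.1) (by omega) (by omega)
        have heq : (k + (d.1).toNat) + (e2 - d.1).toNat = ((k : Int) + e2).toNat := by omega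
        rwa [heq] at hgoal
      rw [zabicaMapM_eq_some_map hcalls,
        List.attach_map_val (l := PySem.List.pyRange 1 (e2 + 1) 1)
          (f := fun d => zabicaG m (k + d.toNat) ((k : Int) + e2).toNat)]
      rw [zabicaG_eq m k (k + e.toNat) hklt]
      have hsr : ((k + e.toNat : Nat) : Int) + m.getD k 0 = (k : Int) + e2 := by
        push_cast [Int.toNat_of_nonneg he]; omega
      simp only [hsr]
      by_cases hesc : (m.length : Int) ≤ (k : Int) + e2
      · -- some jump escapes: the minimum over the comprehension is 0, both sides give 1
        rw [if_pos hesc]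
        have h0 : (0 : Int) ∈ (PySem.List.pyRange 1 (e2 + 1) 1).map
            (fun d => zabicaG m (k + d.toNat) ((k : Int) + e2).toNat) := by
          simp only [List.mem_map]
          refine ⟨e2, PySem.List.mem_pyRange_one.mpr (by omega), ?_⟩
          rw [zabicaG]
          simp [show m.length ≤ k + e2.toNat by omega]
        have hnn : ∀ x ∈ (PySem.List.pyRange 1 (e2 + 1) 1).map
            (fun d => zabicaG m (k + d.toNat) ((k : Int) + e2).toNat), 0 ≤ x := by
          intro x hx
          simp only [List.mem_map] at hx
          obtain ⟨d, _, hd⟩ := hx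
          rw [← hd]; exact zabicaG_nonneg m _ _
        rw [zabicaMin?_eq_zero h0 hnn]
        norm_num
      · -- no escape: the two candidate lists coincide
        rw [if_neg hesc]
        have hlists : (PySem.List.pyRange ((k : Int) + 1) (((k : Int) + e2) + 1) 1).map
              (fun k2 => zabicaG m k2.toNat ((k : Int) + e2).toNat)
            = (PySem.List.pyRange 1 (e2 + 1) 1).map
              (fun d => zabicaG m (k + d.toNat) ((k : Int) + e2).toNat) := by
          rw [PySem.List.pyRange_one 1 (e2 + 1), PySem.List.pyRange_one ((k : Int) + 1)]
          simp only [List.map_map]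
          have hb1 : ((k : Int) + e2 + 1 - ((k : Int) + 1)) = e2 := by ring
          have hb2 : (e2 + 1 - 1) = e2 := by ring
          rw [hb1, hb2]
          apply List.map_congr_left
          intro u _
          simp only [Function.comp_apply]
          congr 1
          omega
        rw [← hlists]
        cases hmin : PySem.List.min?
            ((PySem.List.pyRange ((k : Int) + 1) (((k : Int) + e2) + 1) 1).map
              (fun k2 => zabicaG m k2.toNat ((k : Int) + e2).toNat)) (fun y => y) with
        | none =>
          exfalso
          rw [PySem.List.min?_eq_none_iff, List.map_eq_nil_iff] at hmin
          have hmem : ((k : Int) + 1) ∈ PySem.List.pyRange ((k : Int) + 1) (((k : Int) + e2) + 1) 1 :=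
            PySem.List.mem_pyRange_one.mpr (by omega)
          rw [hmin] at hmem
          simp at hmem
        | some v => simp

lemma zabicaPobeg_eq_G (m : List Int) (hm : ∀ x ∈ m, 1 ≤ x) (k : Nat) (e : Int) (he : 0 ≤ e) :
    zabicaPobeg m k e = some (zabicaG m k (k + e.toNat)) :=
  zabicaPobeg_eq_G_aux m hm (m.length - k) k e le_rfl he

-- B's inner-loop body, named for the proofs (definitionally the lambda in zabica_alt)
def zStepS (m : List Int) (kk : Int) (g : PySem.Dict (Int × Int) Int) (s : Int) :
    PySem.Dict (Int × Int) Int :=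
  let r := s + PySem.List.pyGetD m kk 0
  if (m.length : Int) ≤ r then g.insert (kk, s) 1
  else
    match PySem.List.min?
        ((PySem.List.pyRange (kk + 1) (r + 1) 1).map (fun k2 => g.getD (k2, r) 0))
        (fun y => y) with
    | none => g
    | some v => g.insert (kk, s) (1 + v)

-- invariant of B's table: all cells with first index ≥ kk already hold G
def zabicaInv (m : List Int) (g : PySem.Dict (Int × Int) Int) (kk : Int) : Prop :=
  ∀ (k s : Nat), kk ≤ (k : Int) → k < m.length → k ≤ s → s < m.length →
    g.getD ((k : Int), (s : Int)) 0 = zabicaG m k s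

lemma zStepS_correct (m : List Int) (hm : ∀ x ∈ m, 1 ≤ x) (kk ss : Nat)
    (hk : kk < m.length) (hss1 : kk ≤ ss) (hss2 : ss < m.length)
    (g : PySem.Dict (Int × Int) Int) (hInv : zabicaInv m g ((kk : Int) + 1)) :
    zabicaInv m (zStepS m (kk : Int) g (ss : Int)) ((kk : Int) + 1)
    ∧ (zStepS m (kk : Int) g (ss : Int)).getD ((kk : Int), (ss : Int)) 0 = zabicaG m kk ss
    ∧ ∀ s' : Int, s' ≠ (ss : Int) →
        (zStepS m (kk : Int) g (ss : Int)).getD ((kk : Int), s') 0 = g.getD ((kk : Int), s') 0 := by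
  have hM1 : 1 ≤ m.getD kk 0 := by
    rw [List.getD_eq_getElem m 0 hk]
    exact hm _ (List.getElem_mem hk)
  unfold zStepS
  simp only [PySem.List.pyGetD_natCast]
  by_cases hesc : (m.length : Int) ≤ (ss : Int) + m.getD kk 0
  · rw [if_pos hesc]
    refine ⟨?_, ?_, ?_⟩
    · intro k s hk1 hk2 hk3 hk4
      rw [PySem.Dict.getD_insert_of_ne _ _ _ (by
        intro hcon
        have : (k : Int) = (kk : Int) := congrArg Prod.fst hcon
        omega)]
      exact hInv k s hk1 hk2 hk3 hk4
    · rw [PySem.Dict.getD_insert_self _ _ _ _]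
      rw [zabicaG_eq m kk ss hk, if_pos hesc]
    · intro s' hs'
      rw [PySem.Dict.getD_insert_of_ne _ _ _ (by
        intro hcon
        exact hs' (congrArg Prod.snd hcon))]
  · rw [if_neg hesc]
    have hcands : (PySem.List.pyRange ((kk : Int) + 1) (((ss : Int) + m.getD kk 0) + 1) 1).map
          (fun k2 => g.getD (k2, (ss : Int) + m.getD kk 0) 0)
        = (PySem.List.pyRange ((kk : Int) + 1) (((ss : Int) + m.getD kk 0) + 1) 1).map
          (fun k2 => zabicaG m k2.toNat ((ss : Int) + m.getD kk 0).toNat) := by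
      apply List.map_congr_left
      intro k2 hk2
      obtain ⟨h1, h2⟩ := PySem.List.mem_pyRange_one.mp hk2
      have := hInv k2.toNat ((ss : Int) + m.getD kk 0).toNat
        (by omega) (by omega) (by omega) (by omega)
      rwa [Int.toNat_of_nonneg (by omega), Int.toNat_of_nonneg (by omega)] at this
    rw [hcands]
    cases hmin : PySem.List.min?
        ((PySem.List.pyRange ((kk : Int) + 1) (((ss : Int) + m.getD kk 0) + 1) 1).map
          (fun k2 => zabicaG m k2.toNat ((ss : Int) + m.getD kk 0).toNat)) (fun y => y) with
    | none =>
      exfalso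
      rw [PySem.List.min?_eq_none_iff, List.map_eq_nil_iff] at hmin
      have hmem : ((kk : Int) + 1) ∈ PySem.List.pyRange ((kk : Int) + 1)
          (((ss : Int) + m.getD kk 0) + 1) 1 :=
        PySem.List.mem_pyRange_one.mpr (by omega)
      rw [hmin] at hmem
      simp at hmem
    | some v =>
      refine ⟨?_, ?_, ?_⟩
      · intro k s hk1 hk2 hk3 hk4
        rw [PySem.Dict.getD_insert_of_ne _ _ _ (by
          intro hcon
          have : (k : Int) = (kk : Int) := congrArg Prod.fst hcon
          omega)]
        exact hInv k s hk1 hk2 hk3 hk4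
      · rw [PySem.Dict.getD_insert_self _ _ _ _]
        rw [zabicaG_eq m kk ss hk, if_neg hesc, hmin]
        rfl
      · intro s' hs'
        rw [PySem.Dict.getD_insert_of_ne _ _ _ (by
          intro hcon
          exact hs' (congrArg Prod.snd hcon))]

lemma zabica_inner_aux (m : List Int) (hm : ∀ x ∈ m, 1 ≤ x) (kk : Nat) (hk : kk < m.length) :
    ∀ (t : Nat) (ss : Int) (g : PySem.Dict (Int × Int) Int), (kk : Int) ≤ ss →
      ((m.length : Int) - ss).toNat ≤ t →
      zabicaInv m g ((kk : Int) + 1) →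
      (∀ s' : Nat, kk ≤ s' → (s' : Int) < ss → g.getD ((kk : Int), (s' : Int)) 0 = zabicaG m kk s') →
      zabicaInv m ((PySem.List.pyRange ss (m.length : Int) 1).foldl (zStepS m (kk : Int)) g)
          ((kk : Int) + 1)
      ∧ (∀ s' : Nat, kk ≤ s' → s' < m.length →
          ((PySem.List.pyRange ss (m.length : Int) 1).foldl (zStepS m (kk : Int)) g).getD
            ((kk : Int), (s' : Int)) 0 = zabicaG m kk s') := by
  intro t
  induction t with
  | zero =>
    intro ss g hss ht hInv hdone
    have hnil : PySem.List.pyRange ss (m.length : Int) 1 = [] :=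
      PySem.List.pyRange_one_eq_nil (by omega)
    rw [hnil]
    exact ⟨hInv, fun s' h1 h2 => hdone s' h1 (by omega)⟩
  | succ t ih =>
    intro ss g hss ht hInv hdone
    by_cases hlt : ss < (m.length : Int)
    · rw [PySem.List.pyRange_one_cons hlt, List.foldl_cons]
      have hssn : ss = ((ss.toNat : Nat) : Int) := by omega
      obtain ⟨hInv', hval, hpres⟩ :=
        zStepS_correct m hm kk ss.toNat hk (by omega) (by omega) g hInv
      rw [← hssn] at hInv' hval hpres
      apply ih (ss + 1) (zStepS m (kk : Int) g ss) (by omega) (by omega) hInv'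
      intro s' h1 h2
      by_cases hcase : (s' : Int) = ss
      · rw [hcase, hval]
        have : ss.toNat = s' := by omega
        rw [this]
      · rw [hpres (s' : Int) hcase]
        exact hdone s' h1 (by omega)
    · rw [PySem.List.pyRange_one_eq_nil (by omega)]
      exact ⟨hInv, fun s' h1 h2 => hdone s' h1 (by omega)⟩

lemma zabica_outer_aux (m : List Int) (hm : ∀ x ∈ m, 1 ≤ x) :
    ∀ (t : Nat) (kk : Int) (g : PySem.Dict (Int × Int) Int), -1 ≤ kk → kk < (m.length : Int) →
      (kk + 1).toNat ≤ t → zabicaInv m g (kk + 1) →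
      zabicaInv m ((PySem.List.pyRange kk (-1) (-1)).foldl
        (fun g k => (PySem.List.pyRange k (m.length : Int) 1).foldl (zStepS m k) g) g) 0 := by
  intro t
  induction t with
  | zero =>
    intro kk g h1 h2 ht hInv
    have hkk : kk = -1 := by omega
    subst hkk
    rw [PySem.List.pyRange_neg_one_eq_nil (by omega)]
    simpa using hInv
  | succ t ih =>
    intro kk g h1 h2 ht hInv
    by_cases hkk : kk = -1
    · subst hkk
      rw [PySem.List.pyRange_neg_one_eq_nil (by omega)]
      simpa using hInv
    · have hkk0 : 0 ≤ kk := by omega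
      rw [PySem.List.pyRange_neg_one_cons (by omega), List.foldl_cons]
      have hkkn : kk = ((kk.toNat : Nat) : Int) := by omega
      have hInv' : zabicaInv m g (((kk.toNat : Nat) : Int) + 1) := by rwa [← hkkn]
      obtain ⟨hI, hrow⟩ := zabica_inner_aux m hm kk.toNat (by omega)
        ((m.length : Int) - kk).toNat kk g (by omega) (by omega) hInv'
        (fun s' hs1 hs2 => absurd hs2 (by omega))
      rw [← hkkn] at hI hrow
      have hIkk : zabicaInv m ((PySem.List.pyRange kk (m.length : Int) 1).foldl
          (zStepS m kk) g) kk := by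
        intro k s ha hb hc hd
        by_cases hk' : (k : Int) = kk
        · have hks : kk.toNat = k := by omega
          rw [hk']
          have := hrow s (by omega) hd
          rwa [hks] at this
        · exact hI k s (by omega) hb hc hd
      have hstep : zabicaInv m ((PySem.List.pyRange kk (m.length : Int) 1).foldl
          (zStepS m kk) g) ((kk - 1) + 1) := by
        have : kk - 1 + 1 = kk := by ring
        rwa [this]
      exact ih (kk - 1) _ (by omega) (by omega) (by omega) hstep

lemma zabica_outer (m : List Int) (hm : ∀ x ∈ m, 1 ≤ x) :
    zabicaInv m
      ((PySem.List.pyRange ((m.length : Int) - 1) (-1) (-1)).foldl (fun g k =>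
        (PySem.List.pyRange k (m.length : Int) 1).foldl (fun g s =>
          let r := s + PySem.List.pyGetD m k 0
          if (m.length : Int) ≤ r then g.insert (k, s) 1
          else
            match PySem.List.min?
                ((PySem.List.pyRange (k + 1) (r + 1) 1).map (fun k2 => g.getD (k2, r) 0))
                (fun y => y) with
            | none => g
            | some v => g.insert (k, s) (1 + v)) g) PySem.Dict.empty)
      0 := by
  rcases Nat.eq_zero_or_pos m.length with h0 | hpos
  · intro k s ha hb hc hd
    omega
  · have hemp : zabicaInv m PySem.Dict.empty (((m.length : Int) - 1) + 1) :=
      fun k s ha hb hc hd => absurd ha (by omega)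
    exact zabica_outer_aux m hm ((m.length : Int) - 1 + 1).toNat ((m.length : Int) - 1)
      PySem.Dict.empty (by omega) (by omega) le_rfl hemp

-- ===== VERDICT (by name: the statement is the Claim_ definition above) =====
theorem zabica_spec : Claim_equal_zabica := by
  intro m _ hpre
  unfold Spec_zabica zabica zabica_alt
  rcases Nat.eq_zero_or_pos m.length with h0 | hpos
  · simp [h0, zabicaPobeg]
  · have hA := zabicaPobeg_eq_G m hpre 0 0 le_rfl
    have hB := zabica_outer m hpre
    have hn : ¬ ((m.length : Int) = 0) := by omega
    rw [if_neg hn, hA]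
    have := hB 0 0 (by omega) hpos (le_refl 0) hpos
    simp only [Nat.cast_zero] at this
    simp [this]
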